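-- pv_equiv track=rewrite | github.com/niks199/aoc_2024 | 22.py | pattern_bananas
-- ===== SOURCE A (Python) =====
-- import math
--
-- def secret_value_calc(secret: int):
--     v = secret * 64
--
--     secret = v ^ secret
--     secret = secret % 16777216
--     v2 = math.floor(secret / 32)
--     secret = v2 ^ secret
--     secret = secret % 16777216
--
--     v3 = secret * 2048
--     secret = v3 ^ secret
--
--     secret = secret % 16777216
--
--     return secret
--
-- def pattern_bananas(secret: int, num_values: int):
--     secrets = []
--
--     for i in range(num_values):
--         secrets.append(secret)
--         secret = secret_value_calc(secret)
--
--     prices = [int(str(s)[-1]) for s in secrets]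
--
--     d = [a - b for (a, b) in zip(prices[1:], prices)]
--
--     patterns = {}
--
--     price_patterns = [pp for pp in zip(d, d[1:], d[2:], d[3:], prices[4:])]
--
--     for price_pattern in price_patterns:
--          pattern = tuple(price_pattern[:4])
--          if pattern in patterns:
--              continue
--          if price_pattern[-1] == 0:
--              continue
--          patterns[pattern] = price_pattern[-1]
--
--     return patterns
-- ===== SOURCE B (Python) =====
-- import math
--
-- def secret_value_calc(secret: int):
--     v = secret * 64
--
--     secret = v ^ secret
--     secret = secret % 16777216
--     v2 = math.floor(secret / 32)
--     secret = v2 ^ secret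
--     secret = secret % 16777216
--
--     v3 = secret * 2048
--     secret = v3 ^ secret
--
--     secret = secret % 16777216
--
--     return secret
--
-- def pattern_bananas(secret: int, num_values: int):
--     # Single streaming pass: no secrets/prices/diff lists, just a sliding
--     # window of the last four price changes.
--     patterns = {}
--     prev = None
--     window = []
--     for _ in range(num_values):
--         price = int(str(secret)[-1])
--         if prev is not None:
--             window = (window + [price - prev])[-4:]
--             if len(window) == 4 and price != 0 and tuple(window) not in patterns:
--                 patterns[tuple(window)] = price
--         prev = price
--         secret = secret_value_calc(secret)
--     return patterns
-- ===== Notes on version B (the rewrite author's own statement) =====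
-- stated objective: simpler
-- what changed: Replaced A's four materialised intermediate lists (secrets, prices, diffs, and the five-way zip of shifted lists) and its two loops by a single streaming pass that keeps only the previous price and a sliding window of the last four price changes.
import Mathlib
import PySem

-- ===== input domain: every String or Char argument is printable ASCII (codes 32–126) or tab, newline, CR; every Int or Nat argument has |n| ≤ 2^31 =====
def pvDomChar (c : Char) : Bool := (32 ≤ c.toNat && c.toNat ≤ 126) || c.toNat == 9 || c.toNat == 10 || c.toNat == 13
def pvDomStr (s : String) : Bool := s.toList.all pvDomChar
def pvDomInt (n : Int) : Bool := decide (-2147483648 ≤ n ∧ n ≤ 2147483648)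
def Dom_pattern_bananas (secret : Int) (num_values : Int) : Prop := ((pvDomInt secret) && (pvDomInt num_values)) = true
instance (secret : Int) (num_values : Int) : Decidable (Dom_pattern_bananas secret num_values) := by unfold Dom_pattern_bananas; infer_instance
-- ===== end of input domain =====

-- B replaces A's four intermediate lists (secrets, prices, diffs, zipped 5-tuples) by one
-- streaming pass that keeps only the previous price and a sliding window of the last four diffs
-- (objective: simpler / lower memory; same asymptotic time).

-- ===== PORT A =====

-- shared helper of both Pythons: secret_value_calc.
-- math.floor(secret / 32): at that point 0 ≤ secret < 2^24, so the float division is exact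
-- and equals floor division by 32; ported as PySem.Int.floordiv.
def secret_value_calc (secret : Int) : Int :=
  let v := secret * 64
  let s1 := PySem.Int.bxor v secret
  let s2 := PySem.Int.mod s1 16777216
  let v2 := PySem.Int.floordiv s2 32
  let s3 := PySem.Int.bxor v2 s2
  let s4 := PySem.Int.mod s3 16777216
  let v3 := s4 * 2048
  let s5 := PySem.Int.bxor v3 s4
  PySem.Int.mod s5 16777216

-- int(str(s)[-1]); str(s) is never empty and its last char is a digit, so the fallbacks
-- (0-defaults) are unreachable; used by both ports since both Pythons contain this expression.
def pvLastDigit (s : Int) : Int :=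
  match PySem.Str.pyGet? (PySem.Int.toStr s) (-1) with
  | some c => (PySem.Int.ofChars? [c]).getD 0
  | none => 0

-- body of A's first loop: secrets.append(secret); secret = secret_value_calc(secret)
def pvStepA (st : List Int × Int) : List Int × Int :=
  (st.1 ++ [st.2], secret_value_calc st.2)

-- d = [a - b for (a, b) in zip(prices[1:], prices)]
def pvDiffs (prices : List Int) : List Int :=
  (List.zip (PySem.List.slice prices (some 1) none) prices).map (fun ab => ab.1 - ab.2)

-- price_patterns = [pp for pp in zip(d, d[1:], d[2:], d[3:], prices[4:])]
def pvZips (prices : List Int) : List (Int × Int × Int × Int × Int) :=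
  let d := pvDiffs prices
  List.zip d (List.zip (PySem.List.slice d (some 1) none)
    (List.zip (PySem.List.slice d (some 2) none)
      (List.zip (PySem.List.slice d (some 3) none) (PySem.List.slice prices (some 4) none))))

-- body of A's second loop (continue-chain): skip if pattern present, skip if price 0, insert
def pvInsA (patterns : PySem.Dict (List Int) Int) (pp : Int × Int × Int × Int × Int) :
    PySem.Dict (List Int) Int :=
  let pattern := [pp.1, pp.2.1, pp.2.2.1, pp.2.2.2.1]
  if (patterns.get? pattern).isSome then patterns
  else if pp.2.2.2.2 == 0 then patterns
  else patterns.insert pattern pp.2.2.2.2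

def pattern_bananas (secret : Int) (num_values : Int) : List (List Int × Int) :=
  let st := (PySem.List.pyRange 0 num_values 1).foldl (fun st _ => pvStepA st) ([], secret)
  let prices := st.1.map pvLastDigit
  ((pvZips prices).foldl pvInsA PySem.Dict.empty).items

-- ===== PORT B =====

-- if len(window) == 4 and price != 0 and tuple(window) not in patterns: patterns[...] = price
def pvBIns (patterns : PySem.Dict (List Int) Int) (w : List Int) (price : Int) :
    PySem.Dict (List Int) Int :=
  if w.length == 4 && price != 0 && !(patterns.get? w).isSome
  then patterns.insert w price else patterns

-- body of B's single loop; state = (patterns, prev, window, secret)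
def pvStepB (st : PySem.Dict (List Int) Int × Option Int × List Int × Int) :
    PySem.Dict (List Int) Int × Option Int × List Int × Int :=
  let price := pvLastDigit st.2.2.2
  match st.2.1 with
  | none => (st.1, some price, st.2.2.1, secret_value_calc st.2.2.2)
  | some p =>
    let window' := PySem.List.slice (st.2.2.1 ++ [price - p]) (some (-4)) none
    (pvBIns st.1 window' price, some price, window', secret_value_calc st.2.2.2)

def pattern_bananas_alt (secret : Int) (num_values : Int) : List (List Int × Int) :=
  let st := (PySem.List.pyRange 0 num_values 1).foldl (fun st _ => pvStepB st)
    (PySem.Dict.empty, none, [], secret)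
  st.1.items

-- ===== PRECONDITION & SPEC =====
def Spec_pattern_bananas (secret : Int) (num_values : Int) (out : List (List Int × Int)) : Prop := out = pattern_bananas_alt secret num_values
instance (secret : Int) (num_values : Int) (out : List (List Int × Int)) : Decidable (Spec_pattern_bananas secret num_values out) := by unfold Spec_pattern_bananas; infer_instance

-- ===== CLAIM (what is proved, stated in full; the proofs are below) =====
def Claim_equal_pattern_bananas : Prop := ∀ (secret : Int) (num_values : Int), Dom_pattern_bananas secret num_values → Spec_pattern_bananas secret num_values (pattern_bananas secret num_values)

-- ===== LEMMAS AND PROOFS =====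

-- a fold whose body ignores the element is an iterate
theorem pvFoldlConst {α β : Type} (g : α → α) (l : List β) (i : α) :
    l.foldl (fun s _ => g s) i = g^[l.length] i := by
  induction l generalizing i with
  | nil => rfl
  | cons x xs ih => simp [List.foldl_cons, ih, Function.iterate_succ_apply]

-- the stream of secrets / prices that both programs walk over
def pvSecrets (s : Int) : Nat → List Int
  | 0 => []
  | n + 1 => s :: pvSecrets (secret_value_calc s) n

def pvPrices (s : Int) : Nat → List Int
  | 0 => []
  | n + 1 => pvLastDigit s :: pvPrices (secret_value_calc s) n

theorem pvStepA_iter (n : Nat) : ∀ (acc : List Int) (s : Int),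
    (pvStepA^[n] (acc, s)).1 = acc ++ pvSecrets s n := by
  induction n with
  | zero => intro acc s; simp [pvSecrets]
  | succ m ih =>
    intro acc s
    rw [Function.iterate_succ_apply]
    simp [pvStepA, ih, pvSecrets]

theorem pvSecrets_map (n : Nat) : ∀ (s : Int),
    (pvSecrets s n).map pvLastDigit = pvPrices s n := by
  induction n with
  | zero => intro s; simp [pvSecrets, pvPrices]
  | succ m ih => intro s; simp [pvSecrets, pvPrices, ih]

-- xs[-4:] is drop (len - 4)
theorem pvSlice4 (xs : List Int) :
    PySem.List.slice xs (some (-4)) none = xs.drop (xs.length - 4) :=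
  PySem.List.slice_from_neg_ofNat xs 4 (by omega)

-- the sliding-window recursion B follows once the first price has been seen
def pvSpecGo : PySem.Dict (List Int) Int → List Int → Int → List Int → PySem.Dict (List Int) Int
  | pat, _, _, [] => pat
  | pat, w, p, q :: qs =>
    let w' := PySem.List.slice (w ++ [q - p]) (some (-4)) none
    pvSpecGo (pvBIns pat w' q) w' q qs

theorem pvStepB_iter (n : Nat) :
    ∀ (pat : PySem.Dict (List Int) Int) (w : List Int) (p s : Int),
    (pvStepB^[n] (pat, some p, w, s)).1 = pvSpecGo pat w p (pvPrices s n) := by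
  induction n with
  | zero => intro pat w p s; simp [pvPrices, pvSpecGo]
  | succ m ih =>
    intro pat w p s
    rw [Function.iterate_succ_apply]
    simp only [pvStepB, pvPrices, pvSpecGo, ih]

-- A's sliding 5-tuples, head-recursively
def pvQuints : List Int → List (Int × Int × Int × Int × Int)
  | a :: b :: c :: d :: e :: t => (b - a, c - b, d - c, e - d, e) :: pvQuints (b :: c :: d :: e :: t)
  | _ => []
termination_by l => l.length

theorem pvDiffs_cons (a b : Int) (t : List Int) :
    pvDiffs (a :: b :: t) = (b - a) :: pvDiffs (b :: t) := by
  simp [pvDiffs, PySem.List.slice_from_one]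

-- A's zip pipeline produces exactly those 5-tuples
theorem pvZips_eq : (ps : List Int) → pvZips ps = pvQuints ps
  | [] => by simp [pvZips, pvQuints, pvDiffs]
  | [a] => by simp [pvZips, pvQuints, pvDiffs, PySem.List.slice_from_one]
  | [a, b] => by
    simp [pvZips, pvQuints, pvDiffs, PySem.List.slice_from]
  | [a, b, c] => by
    simp [pvZips, pvQuints, pvDiffs, PySem.List.slice_from]
  | [a, b, c, d] => by
    simp [pvZips, pvQuints, pvDiffs, PySem.List.slice_from]
  | a :: b :: c :: d :: e :: t => by
    have ih := pvZips_eq (b :: c :: d :: e :: t)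
    simp only [pvZips, pvDiffs_cons] at *
    rw [pvQuints]
    simp_all [PySem.List.slice_from]
termination_by ps => ps.length

-- A's continue-chain and B's one-line condition insert the same entries
theorem pvInsA_eq (pat : PySem.Dict (List Int) Int) (x1 x2 x3 x4 x5 : Int) :
    pvInsA pat (x1, x2, x3, x4, x5) = pvBIns pat [x1, x2, x3, x4] x5 := by
  by_cases h1 : (pat.get? [x1, x2, x3, x4]).isSome <;>
    by_cases h2 : x5 = 0 <;>
      simp [pvInsA, pvBIns, h1, h2]

-- full-window phase: folding A's quints = running B's window recursion
theorem pvL1 (t : List Int) : ∀ (pat : PySem.Dict (List Int) Int) (a b c d e : Int),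
    (pvQuints (a :: b :: c :: d :: e :: t)).foldl pvInsA pat
      = pvSpecGo (pvBIns pat [b - a, c - b, d - c, e - d] e) [b - a, c - b, d - c, e - d] e t := by
  induction t with
  | nil =>
    intro pat a b c d e
    rw [pvQuints]
    simp [pvQuints, pvSpecGo, pvInsA_eq]
  | cons f t' ih =>
    intro pat a b c d e
    rw [pvQuints]
    simp only [List.foldl_cons, pvInsA_eq, ih]
    rw [pvSpecGo]
    simp [pvSlice4]

-- warm-up phase: with fewer than four diffs B never inserts, and A has no quints yet
theorem pvW (qs : List Int) (pat : PySem.Dict (List Int) Int) (p : Int) :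
    (pvQuints (p :: qs)).foldl pvInsA pat = pvSpecGo pat [] p qs := by
  match qs with
  | [] =>
    rw [pvQuints]
    · simp [pvSpecGo]
    · intros; simp_all
  | [q1] =>
    rw [pvQuints]
    · simp [pvSpecGo, pvSlice4, pvBIns]
    · intros; simp_all
  | [q1, q2] =>
    rw [pvQuints]
    · simp [pvSpecGo, pvSlice4, pvBIns]
    · intros; simp_all
  | [q1, q2, q3] =>
    rw [pvQuints]
    · simp [pvSpecGo, pvSlice4, pvBIns]
    · intros; simp_all
  | q1 :: q2 :: q3 :: q4 :: rest =>
    rw [pvL1]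
    simp [pvSpecGo, pvSlice4, pvBIns]

-- ===== VERDICT (by name: the statement is the Claim_ definition above) =====
theorem pattern_bananas_spec : Claim_equal_pattern_bananas := by
  intro secret num_values _
  simp only [Spec_pattern_bananas, pattern_bananas, pattern_bananas_alt]
  rw [pvFoldlConst pvStepA, pvFoldlConst pvStepB]
  rw [pvStepA_iter]
  simp only [List.nil_append]
  rw [pvSecrets_map, pvZips_eq]
  cases h : (PySem.List.pyRange 0 num_values 1).length with
  | zero => simp [pvPrices, pvQuints]
  | succ m =>
    rw [Function.iterate_succ_apply]
    simp only [pvStepB]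
    rw [pvStepB_iter]
    rw [pvPrices, pvW]
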